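-- pv_equiv track=rewrite | github.com/lopezmauro/RL_Maya | src/maya_utils/meshes.py | getVerticesFaces
-- ===== SOURCE A (Python) =====
-- def getVerticesFaces(faceVertices):
--     """given a list with all the vertices indices for each face
--     returns a list for each vertex and wich faces are conneted to it
--     Args:
--         faceVertices (list): [description]
--     Returns:
--         list: list of faces connected to the vertices
--     """
--     result = list()
--     # cast them into a dict in order to not worry about the initial list size
--     vertexFaces = dict()
--     for f, fVtx in enumerate(faceVertices):
--         for vtx in fVtx:
--             vertexFaces.setdefault(vtx, set()).add(f)
--     # convert dict to list for faster post iteration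
--     indices = list(vertexFaces.keys())
--     indices.sort()
--     for idx in indices:
--         result.append(vertexFaces[idx])
--     return result
-- ===== SOURCE B (Python) =====
-- def getVerticesFaces(faceVertices):
--     """given a list with all the vertices indices for each face
--     returns a list for each vertex and wich faces are conneted to it"""
--     # flatten to (vertex, face) pairs, sort stably by vertex, then group runs
--     pairs = []
--     for f, fVtx in enumerate(faceVertices):
--         for vtx in fVtx:
--             pairs.append((vtx, f))
--     pairs.sort(key=lambda p: p[0])
--     result = []
--     i = 0
--     n = len(pairs)
--     while i < n:
--         v = pairs[i][0]
--         faces = set()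
--         while i < n and pairs[i][0] == v:
--             faces.add(pairs[i][1])
--             i += 1
--         result.append(faces)
--     return result
-- ===== Notes on version B (the rewrite author's own statement) =====
-- stated objective: alternative
-- what changed: Replaces A's dict-of-sets accumulation followed by key sorting with flattening to (vertex, face) pairs, one stable sort by vertex, and a single sweep that emits one face-set per run of equal vertices.
import Mathlib
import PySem

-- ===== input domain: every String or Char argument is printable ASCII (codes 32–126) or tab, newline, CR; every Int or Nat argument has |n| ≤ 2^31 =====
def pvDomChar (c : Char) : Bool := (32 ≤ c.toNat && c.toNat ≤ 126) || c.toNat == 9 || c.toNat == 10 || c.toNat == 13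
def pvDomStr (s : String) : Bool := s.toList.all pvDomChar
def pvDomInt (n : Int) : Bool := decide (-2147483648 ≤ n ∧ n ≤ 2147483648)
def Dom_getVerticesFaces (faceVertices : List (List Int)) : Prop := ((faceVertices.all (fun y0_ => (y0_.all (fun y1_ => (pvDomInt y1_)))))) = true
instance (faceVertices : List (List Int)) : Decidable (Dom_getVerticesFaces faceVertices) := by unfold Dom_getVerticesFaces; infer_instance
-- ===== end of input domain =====

-- B replaces A's dict-of-sets accumulation by flatten-to-(vertex,face)-pairs, one stable sort, and a single
-- grouping sweep over runs of equal vertices (objective: alternative algorithm, sort-and-group vs hash grouping).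

-- ===== PORT A =====
-- vertexFaces.setdefault(vtx, set()).add(f)  ≡  vertexFaces[vtx] = vertexFaces.get(vtx, set()) ∪ {f}, i.e. Dict.modify.
-- vertexFaces[idx] (key always present) is ported as getD with default ∅.
def getVerticesFaces (faceVertices : List (List Int)) : List (List Int) :=
  let vertexFaces : PySem.Dict Int (PySem.Set Int) :=
    (PySem.List.enumerate faceVertices).foldl
      (fun d p => p.2.foldl (fun d vtx => d.modify vtx PySem.Set.empty (fun s => s.add p.1)) d)
      PySem.Dict.empty
  let indices : List Int := PySem.List.sorted (PySem.Dict.keys vertexFaces) (fun x => x)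
  indices.foldl (fun result idx => result ++ [vertexFaces.getD idx PySem.Set.empty]) []

-- ===== PORT B =====
-- inner while loop of Source B: consume the run of pairs whose vertex equals v, collecting their faces into a set
def pvTakeRun (v : Int) (s : PySem.Set Int) : List (Int × Int) → PySem.Set Int × List (Int × Int)
  | [] => (s, [])
  | q :: t => if q.1 == v then pvTakeRun v (s.add q.2) t else (s, q :: t)

theorem pvTakeRun_length (v : Int) : ∀ (l : List (Int × Int)) (s : PySem.Set Int),
    (pvTakeRun v s l).2.length ≤ l.length := by
  intro l
  induction l with
  | nil => intro s; simp [pvTakeRun]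
  | cons q t ih =>
    intro s
    by_cases h : (q.1 == v) = true
    · simp only [pvTakeRun, h, if_pos]
      exact Nat.le_trans (ih _) (Nat.le_succ _)
    · simp [pvTakeRun, h]

-- outer while loop of Source B: one group per run of equal vertices
def pvGroups : List (Int × Int) → List (List Int)
  | [] => []
  | q :: rest =>
    let r := pvTakeRun q.1 (PySem.Set.add PySem.Set.empty q.2) rest
    r.1 :: pvGroups r.2
termination_by l => l.length
decreasing_by
  have := pvTakeRun_length q.1 rest (PySem.Set.add PySem.Set.empty q.2)
  simpa using Nat.lt_succ_of_le this

def getVerticesFaces_alt (faceVertices : List (List Int)) : List (List Int) :=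
  let pairs : List (Int × Int) :=
    (PySem.List.enumerate faceVertices).foldl
      (fun acc p => p.2.foldl (fun acc vtx => acc ++ [(vtx, p.1)]) acc) []
  let sortedPairs := PySem.List.sorted pairs (fun q => q.1)
  pvGroups sortedPairs

-- ===== PRECONDITION & SPEC =====
def Spec_getVerticesFaces (faceVertices : List (List Int)) (out : List (List Int)) : Prop := out = getVerticesFaces_alt faceVertices
instance (faceVertices : List (List Int)) (out : List (List Int)) : Decidable (Spec_getVerticesFaces faceVertices out) := by unfold Spec_getVerticesFaces; infer_instance

-- ===== CLAIM (what is proved, stated in full; the proofs are below) =====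
def Claim_equal_getVerticesFaces : Prop := ∀ (faceVertices : List (List Int)), Dom_getVerticesFaces faceVertices → Spec_getVerticesFaces faceVertices (getVerticesFaces faceVertices)

-- ===== LEMMAS AND PROOFS =====

-- the flat (vertex, face) pair list both programs are secretly about
def pvPairs (faceVertices : List (List Int)) : List (Int × Int) :=
  (PySem.List.enumerate faceVertices).flatMap (fun p => p.2.map (fun v => (v, p.1)))

-- B's pair-building loop builds pvPairs
theorem pvPairs_build (l : List (Int × List Int)) (acc : List (Int × Int)) :
    l.foldl (fun acc p => p.2.foldl (fun acc vtx => acc ++ [(vtx, p.1)]) acc) acc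
      = acc ++ l.flatMap (fun p => p.2.map (fun v => (v, p.1))) := by
  induction l generalizing acc with
  | nil => simp
  | cons p t ih =>
    simp only [List.foldl_cons, List.flatMap_cons]
    rw [PySem.List.foldl_append_singleton_eq_map, ih, List.append_assoc]

-- A's nested grouping loop is the fold of the same step over pvPairs
theorem pvDict_build (l : List (Int × List Int)) (d : PySem.Dict Int (PySem.Set Int)) :
    l.foldl (fun d p => p.2.foldl (fun d vtx => d.modify vtx PySem.Set.empty (fun s => s.add p.1)) d) d
      = (l.flatMap (fun p => p.2.map (fun v => (v, p.1)))).foldl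
          (fun d q => d.modify q.1 PySem.Set.empty (fun s => s.add q.2)) d := by
  rw [List.foldl_flatMap]
  simp [List.foldl_map]

-- value of the grouping dict at any key
theorem pvGetD_fold (l : List (Int × Int)) (d : PySem.Dict Int (PySem.Set Int)) (v : Int) :
    (l.foldl (fun d q => d.modify q.1 PySem.Set.empty (fun s => s.add q.2)) d).getD v PySem.Set.empty
      = PySem.Set.update (d.getD v PySem.Set.empty) ((l.filter (fun q => q.1 == v)).map (·.2)) := by
  induction l generalizing d with
  | nil => simp [PySem.Set.update]
  | cons q t ih =>
    simp only [List.foldl_cons, List.filter_cons]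
    rw [ih]
    by_cases h : q.1 = v
    · subst h
      simp [PySem.Set.update_cons]
    · have hb : (q.1 == v) = false := by simp [h]
      simp [PySem.Dict.getD_modify, Ne.symm h, hb]

-- discard commutes with ofList as a filter
theorem pvOfList_discard (x : Int) (l : List Int) :
    (PySem.Set.ofList l).discard x = PySem.Set.ofList (l.filter (fun y => !(y == x))) := by
  induction l using List.reverseRecOn with
  | nil => simp [PySem.Set.ofList, PySem.Set.discard, PySem.Set.empty]
  | append_singleton t y ih =>
    rw [PySem.Set.ofList_append_singleton, List.filter_append, List.filter_cons]
    by_cases h : y = x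
    · subst h
      simp only [beq_self_eq_true, Bool.not_true, Bool.false_eq_true, if_neg, not_false_iff,
        List.filter_nil, List.append_nil]
      rw [← ih]
      by_cases hm : y ∈ PySem.Set.ofList t
      · have h1 : (PySem.Set.ofList t).add y = PySem.Set.ofList t := by
          simp [PySem.Set.add, PySem.Set.contains, List.contains_eq_mem, hm]
        rw [h1]
      · have h1 : (PySem.Set.ofList t).add y = PySem.Set.ofList t ++ [y] := by
          simp [PySem.Set.add, PySem.Set.contains, List.contains_eq_mem, hm]
        rw [h1]
        simp [PySem.Set.discard, List.filter_append]
    · have hb : (y == x) = false := by simp [h]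
      simp only [hb, Bool.not_false, if_pos, List.filter_nil]
      rw [PySem.Set.ofList_append_singleton, ← ih]
      by_cases hm : y ∈ PySem.Set.ofList t
      · have h1 : (PySem.Set.ofList t).add y = PySem.Set.ofList t := by
          simp [PySem.Set.add, PySem.Set.contains, List.contains_eq_mem, hm]
        have h2 : ((PySem.Set.ofList t).discard x).add y = (PySem.Set.ofList t).discard x := by
          simp [PySem.Set.add, PySem.Set.contains, PySem.Set.discard, List.contains_eq_mem,
            List.mem_filter, hm, h]
        rw [h1, h2]
      · have h1 : (PySem.Set.ofList t).add y = PySem.Set.ofList t ++ [y] := by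
          simp [PySem.Set.add, PySem.Set.contains, List.contains_eq_mem, hm]
        have h2 : ((PySem.Set.ofList t).discard x).add y = (PySem.Set.ofList t).discard x ++ [y] := by
          simp [PySem.Set.add, PySem.Set.contains, PySem.Set.discard, List.contains_eq_mem,
            List.mem_filter, hm]
        rw [h1, h2]
        simp [PySem.Set.discard, List.filter_append, hb]

-- ofList is a sublist of its argument
theorem pvOfList_sublist (l : List Int) : List.Sublist (PySem.Set.ofList l) l := by
  induction l using List.reverseRecOn with
  | nil => simp [PySem.Set.ofList, PySem.Set.empty]
  | append_singleton t y ih =>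
    rw [PySem.Set.ofList_append_singleton]
    unfold PySem.Set.add
    by_cases hc : (PySem.Set.ofList t).contains y = true
    · simp only [hc, if_pos]
      exact ih.trans (List.sublist_append_left t [y])
    · simp only [hc, if_neg, Bool.not_eq_true]
      exact List.Sublist.append ih (List.Sublist.refl [y])

-- behind a run of equal vertices everything has a different (larger) vertex
theorem pvDropWhile_ne (q : Int × Int) (rest : List (Int × Int))
    (h : (q :: rest).Pairwise (fun a b => a.1 ≤ b.1)) :
    ∀ x ∈ rest.dropWhile (fun p => p.1 == q.1), x.1 ≠ q.1 := by
  induction rest with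
  | nil => simp
  | cons p t ih =>
    rw [List.pairwise_cons, List.pairwise_cons] at h
    obtain ⟨hq, hp, ht⟩ := h
    by_cases hpq : (p.1 == q.1) = true
    · rw [List.dropWhile_cons, if_pos hpq]
      apply ih
      rw [List.pairwise_cons]
      exact ⟨fun b hb => hq b (List.mem_cons_of_mem p hb), ht⟩
    · rw [List.dropWhile_cons, if_neg hpq]
      simp only [beq_iff_eq] at hpq
      have hne : p.1 ≠ q.1 := by simpa using hpq
      have hqlt : q.1 < p.1 := lt_of_le_of_ne (hq p (List.mem_cons_self)) (Ne.symm hne)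
      intro x hx
      rw [List.mem_cons] at hx
      rcases hx with rfl | hx
      · exact hne
      · intro hc
        have h1 := hp x hx
        omega

-- pvTakeRun consumes exactly the leading run
theorem pvTakeRun_eq (v : Int) (l : List (Int × Int)) (s : PySem.Set Int) :
    pvTakeRun v s l
      = (PySem.Set.update s ((l.takeWhile (fun q => q.1 == v)).map (·.2)),
         l.dropWhile (fun q => q.1 == v)) := by
  induction l generalizing s with
  | nil => simp [pvTakeRun, PySem.Set.update]
  | cons q t ih =>
    by_cases h : (q.1 == v) = true
    · rw [List.takeWhile_cons, if_pos h, List.dropWhile_cons, if_pos h]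
      simp only [pvTakeRun, h, if_pos]
      rw [ih, List.map_cons, PySem.Set.update_cons]
    · rw [List.takeWhile_cons, if_neg h, List.dropWhile_cons, if_neg h]
      simp [pvTakeRun, h, PySem.Set.update]

-- stability of the insertion step: the filter at any fixed key is preserved
theorem pvInsertBy_filter (c : Int) (x : Int × Int) (acc : List (Int × Int))
    (h : acc.Pairwise (fun a b => a.1 ≤ b.1)) :
    (PySem.List.insertBy (fun a b => decide (a.1 < b.1)) x acc).filter (fun q => q.1 == c)
      = acc.filter (fun q => q.1 == c) ++ if (x.1 == c) = true then [x] else [] := by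
  induction acc with
  | nil => simp only [PySem.List.insertBy, List.filter_cons, List.filter_nil, List.nil_append]
  | cons y ys ih =>
    rw [List.pairwise_cons] at h
    obtain ⟨hy, hys⟩ := h
    show (if (decide (x.1 < y.1)) = true then x :: y :: ys else y :: PySem.List.insertBy _ x ys).filter _ = _
    by_cases hlt : x.1 < y.1
    · simp only [hlt, decide_true, if_pos]
      by_cases hxc : (x.1 == c) = true
      · have hxc' : x.1 = c := by simpa using hxc
        have hyc : (y.1 == c) = false := by
          rw [beq_eq_false_iff_ne]
          intro hc; rw [hc, ← hxc'] at hlt; exact lt_irrefl _ hlt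
        have hfil : ys.filter (fun q => q.1 == c) = [] := by
          rw [List.filter_eq_nil_iff]
          intro a ha
          simp only [beq_iff_eq]
          intro hc
          have := hy a ha
          rw [hc, ← hxc'] at this
          exact absurd (lt_of_lt_of_le hlt this) (lt_irrefl _)
        simp [hxc, hyc, hfil]
      · simp [List.filter_cons, hxc]
    · simp only [hlt, decide_false, if_neg, Bool.false_eq_true, not_false_iff]
      rw [List.filter_cons, List.filter_cons, ih hys]
      by_cases hyc : (y.1 == c) = true
      · simp [hyc]
      · simp [hyc]

-- stability of the sort: filtering at a fixed vertex commutes with sorting by vertex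
theorem pvSorted_filter (c : Int) (xs : List (Int × Int)) :
    (PySem.List.sorted xs (fun q => q.1)).filter (fun q => q.1 == c)
      = xs.filter (fun q => q.1 == c) := by
  induction xs using List.reverseRecOn with
  | nil => simp [PySem.List.sorted]
  | append_singleton t x ih =>
    rw [PySem.List.sorted_eq_foldl_insertBy] at *
    rw [List.foldl_append, List.foldl_cons, List.foldl_nil]
    rw [pvInsertBy_filter c x _ (by
      rw [← PySem.List.sorted_eq_foldl_insertBy]
      exact PySem.List.sorted_pairwise t (fun q => q.1))]
    rw [ih, List.filter_append]
    congr 1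
    simp [List.filter_cons]

-- characterization of the grouping sweep on a list sorted by vertex
theorem pvGroups_eq (S : List (Int × Int)) (h : S.Pairwise (fun a b => a.1 ≤ b.1)) :
    pvGroups S
      = (PySem.List.dedup (S.map (·.1))).map
          (fun v => PySem.Set.ofList ((S.filter (fun q => q.1 == v)).map (·.2))) := by
  induction hk : S.length using Nat.strong_induction_on generalizing S with
  | _ n ih =>
  match S, h with
  | [], _ => simp [pvGroups, PySem.List.dedup, PySem.Set.ofList, PySem.Set.empty]
  | q :: rest, h =>
    set run := rest.takeWhile (fun p => p.1 == q.1) with hrun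
    set rest' := rest.dropWhile (fun p => p.1 == q.1) with hrest'
    have hsplit : rest = run ++ rest' := (List.takeWhile_append_dropWhile).symm
    have hrunall : ∀ x ∈ run, x.1 = q.1 := by
      intro x hx
      have := List.mem_takeWhile_imp hx
      simpa using this
    have hrest'ne : ∀ x ∈ rest', x.1 ≠ q.1 := pvDropWhile_ne q rest h
    have hpair' : rest'.Pairwise (fun a b => a.1 ≤ b.1) :=
      (List.Pairwise.sublist (List.dropWhile_sublist _) (List.Pairwise.of_cons h))
    -- length decrease
    have hlen : rest'.length < n := by
      have h1 : rest'.length ≤ rest.length := List.length_dropWhile_le _ _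
      simp only [List.length_cons] at hk
      omega
    have ihr := ih rest'.length hlen rest' hpair' rfl
    -- the filter of S at q.1 is q followed by the run
    have hfq : (q :: rest).filter (fun p => p.1 == q.1) = q :: run := by
      rw [List.filter_cons, if_pos (by simp)]
      congr 1
      rw [hsplit, List.filter_append]
      rw [List.filter_eq_self.mpr (fun a ha => by simp [hrunall a ha]),
          List.filter_eq_nil_iff.mpr (fun a ha => by simp [hrest'ne a ha])]
      simp
    -- the filter of S at any other key is the filter of rest'
    have hfo : ∀ v, v ≠ q.1 → (q :: rest).filter (fun p => p.1 == v) = rest'.filter (fun p => p.1 == v) := by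
      intro v hv
      rw [List.filter_cons, if_neg (by simp only [beq_iff_eq]; exact fun hc => hv hc.symm)]
      rw [hsplit, List.filter_append]
      rw [List.filter_eq_nil_iff.mpr (by
            intro a ha
            simp only [beq_iff_eq]
            rw [hrunall a ha]
            exact fun hc => hv hc.symm)]
      simp
    -- the dedup of the keys
    have hded : PySem.List.dedup ((q :: rest).map (·.1)) = q.1 :: PySem.List.dedup (rest'.map (·.1)) := by
      rw [PySem.List.dedup_eq_ofList, PySem.List.dedup_eq_ofList, List.map_cons,
          PySem.Set.ofList_cons, pvOfList_discard]
      congr 1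
      congr 1
      rw [hsplit, List.map_append, List.filter_append]
      rw [List.filter_eq_nil_iff.mpr (by
            intro a ha
            simp only [List.mem_map] at ha
            obtain ⟨x, hx, rfl⟩ := ha
            simp [hrunall x hx]),
          List.filter_eq_self.mpr (by
            intro a ha
            simp only [List.mem_map] at ha
            obtain ⟨x, hx, rfl⟩ := ha
            simp [hrest'ne x hx])]
      simp
    -- unfold one step of pvGroups
    rw [pvGroups]
    rw [pvTakeRun_eq]
    simp only []
    rw [hded, List.map_cons]
    congr 1
    · -- head group
      rw [hfq]
      have : PySem.Set.update (PySem.Set.add PySem.Set.empty q.2) (run.map (·.2))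
          = PySem.Set.ofList (q.2 :: run.map (·.2)) := by
        simp [PySem.Set.ofList, PySem.Set.update, PySem.Set.empty]
      rw [this]
      simp
    · rw [ihr]
      apply List.map_congr_left
      intro v hv
      have hvne : v ≠ q.1 := by
        rw [PySem.List.mem_dedup] at hv
        simp only [List.mem_map] at hv
        obtain ⟨x, hx, rfl⟩ := hv
        exact hrest'ne x hx
      rw [hfo v hvne]

-- the sorted distinct keys of the pair list are the dedup of the keys of the sorted pair list
theorem pvKeys_eq (P : List (Int × Int)) :
    PySem.List.sorted (PySem.Set.ofList (P.map (·.1))) (fun x => x)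
      = PySem.List.dedup ((PySem.List.sorted P (fun q => q.1)).map (·.1)) := by
  apply PySem.List.sorted_eq_of_perm_of_pairwise_lt
  · -- permutation
    apply (List.perm_ext_iff_of_nodup (PySem.List.nodup_dedup _) (PySem.Set.nodup_ofList _)).mpr
    intro a
    rw [PySem.List.mem_dedup, PySem.Set.mem_ofList]
    constructor
    · intro ha
      simp only [List.mem_map] at ha ⊢
      obtain ⟨x, hx, rfl⟩ := ha
      exact ⟨x, (PySem.List.sorted_perm P _ _).mem_iff.mp hx, rfl⟩
    · intro ha
      simp only [List.mem_map] at ha ⊢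
      obtain ⟨x, hx, rfl⟩ := ha
      exact ⟨x, (PySem.List.sorted_perm P _ _).mem_iff.mpr hx, rfl⟩
  · -- strictly increasing
    have hle : ((PySem.List.sorted P (fun q => q.1)).map (·.1)).Pairwise (· ≤ ·) :=
      PySem.List.sorted_map_key_pairwise P _
    have hsub : List.Sublist (PySem.List.dedup ((PySem.List.sorted P (fun q => q.1)).map (·.1)))
        ((PySem.List.sorted P (fun q => q.1)).map (·.1)) := by
      rw [PySem.List.dedup_eq_ofList]; exact pvOfList_sublist _
    have h1 : (PySem.List.dedup ((PySem.List.sorted P (fun q => q.1)).map (·.1))).Pairwise (· ≤ ·) :=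
      List.Pairwise.sublist hsub hle
    have h2 := PySem.List.nodup_dedup ((PySem.List.sorted P (fun q => q.1)).map (·.1))
    exact (h1.and h2).imp (fun {a b} hab => lt_of_le_of_ne hab.1 hab.2)

-- ===== VERDICT (by name: the statement is the Claim_ definition above) =====
theorem getVerticesFaces_spec : Claim_equal_getVerticesFaces := by
  unfold Claim_equal_getVerticesFaces
  intro fv _
  unfold Spec_getVerticesFaces getVerticesFaces getVerticesFaces_alt
  simp only []
  rw [pvPairs_build, pvDict_build, List.nil_append]
  set P := (PySem.List.enumerate fv).flatMap (fun p => p.2.map (fun v => (v, p.1))) with hP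
  set D := P.foldl (fun d q => d.modify q.1 PySem.Set.empty (fun s => s.add q.2)) PySem.Dict.empty with hD
  rw [PySem.List.foldl_append_singleton_eq_map, List.nil_append]
  have hkeys : PySem.Dict.keys D = PySem.Set.ofList (P.map (·.1)) := by
    rw [hD]
    rw [PySem.Dict.keys_foldl_modify_key P (·.1) PySem.Set.empty (fun _ q s => s.add q.2) PySem.Dict.empty]
    exact PySem.Set.update_nil_left _
  rw [hkeys]
  rw [pvGroups_eq _ (PySem.List.sorted_pairwise P (fun q => q.1))]
  rw [← pvKeys_eq P]
  apply List.map_congr_left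
  intro v _
  rw [hD, pvGetD_fold]
  rw [pvSorted_filter]
  rw [PySem.Dict.getD_empty]
  exact PySem.Set.update_nil_left _
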